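-- pv_equiv track=rewrite | github.com/ravi1teja/Big-Data | Linguistic-Feature-Extraction-on-Twitter-Streaming-data-using-Spark-RDD/StreamSlidingWindow.py | ratioOfTweetsContainingTentative
-- ===== SOURCE A (Python) =====
-- def ratioOfTweetsContainingTentative(text):
--     text_tweet = [textQ for textQ in text.split(" ")]
--     tentativeCount = 0
--     for word in text_tweet:
--         if word in ["maybe", "guess", "perhaps", "experimental" , "experiment" , ]:
--             tentativeCount = 1
--             break
--         else:
--             tentativeCount = 0
--     return ("tentativeCount",tentativeCount)
-- ===== SOURCE B (Python) =====
-- # B: single character-level pass — a streaming tokenizer that checks each word as it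
-- # completes and returns early, instead of building the split list and scanning it.
-- TENTATIVE = ("maybe", "guess", "perhaps", "experimental", "experiment")
--
-- def ratioOfTweetsContainingTentative(text):
--     word = []
--     for ch in text:
--         if ch == " ":
--             if "".join(word) in TENTATIVE:
--                 return ("tentativeCount", 1)
--             word = []
--         else:
--             word.append(ch)
--     return ("tentativeCount", 1 if "".join(word) in TENTATIVE else 0)
-- ===== Notes on version B (the rewrite author's own statement) =====
-- stated objective: alternative
-- what changed: Replaces split-then-scan (materialize the split word list, loop over it with break) by a single streaming character pass that tokenizes words itself with an accumulator and returns early when a completed word is tentative.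
import Mathlib
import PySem

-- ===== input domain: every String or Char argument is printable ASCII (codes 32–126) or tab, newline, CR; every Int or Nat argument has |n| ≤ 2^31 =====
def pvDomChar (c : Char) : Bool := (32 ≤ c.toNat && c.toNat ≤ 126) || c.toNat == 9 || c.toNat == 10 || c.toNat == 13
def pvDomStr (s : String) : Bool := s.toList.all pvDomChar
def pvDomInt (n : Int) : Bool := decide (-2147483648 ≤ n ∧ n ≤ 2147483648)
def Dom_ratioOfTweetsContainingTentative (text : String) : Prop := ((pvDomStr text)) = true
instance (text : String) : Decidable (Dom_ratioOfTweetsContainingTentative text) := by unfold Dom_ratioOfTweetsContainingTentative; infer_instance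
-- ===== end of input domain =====

-- B: a single streaming character pass that tokenizes words itself and returns early,
-- instead of A's split-then-scan; same cost, different traversal (return value only).

-- ===== PORT A =====
def pvTentList : List String := ["maybe", "guess", "perhaps", "experimental", "experiment"]

-- the for-loop with break: first word in the tentative list gives 1, otherwise keep 0
def pvLoopA : List String → Int
  | [] => 0
  | w :: ws => if w ∈ pvTentList then 1 else pvLoopA ws

def ratioOfTweetsContainingTentative (text : String) : String × Int :=
  let text_tweet := ((PySem.Str.split? text " ").getD []).map (fun textQ => textQ)
  ("tentativeCount", pvLoopA text_tweet)

-- ===== PORT B =====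
-- the char loop: `word` is the chars of the current token so far; space ends a token
def pvScanB : List Char → List Char → Int
  | [], word => if String.ofList word ∈ pvTentList then 1 else 0
  | ch :: rest, word =>
      if ch = ' ' then
        if String.ofList word ∈ pvTentList then 1 else pvScanB rest []
      else pvScanB rest (word ++ [ch])

def ratioOfTweetsContainingTentative_alt (text : String) : String × Int :=
  ("tentativeCount", pvScanB text.toList [])

-- ===== PRECONDITION & SPEC =====
def Spec_ratioOfTweetsContainingTentative (text : String) (out : String × Int) : Prop := out = ratioOfTweetsContainingTentative_alt text
instance (text : String) (out : String × Int) : Decidable (Spec_ratioOfTweetsContainingTentative text out) := by unfold Spec_ratioOfTweetsContainingTentative; infer_instance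

-- ===== CLAIM (what is proved, stated in full; the proofs are below) =====
def Claim_equal_ratioOfTweetsContainingTentative : Prop := ∀ (text : String), Dom_ratioOfTweetsContainingTentative text → Spec_ratioOfTweetsContainingTentative text (ratioOfTweetsContainingTentative text)

-- ===== LEMMAS AND PROOFS =====

-- reference splitter: structural recursion on the chars, current piece carried forward
def pvSplitSp : List Char → List Char → List (List Char)
  | [], cur => [cur]
  | a :: rest, cur => if a = ' ' then cur :: pvSplitSp rest [] else pvSplitSp rest (cur ++ [a])

theorem pvGo_eq (fuel : Nat) : ∀ (l cur : List Char) (acc : List (List Char)), l.length ≤ fuel →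
    PySem.Chars.splitOn.go [' '] fuel l cur acc = acc.reverse ++ pvSplitSp l cur.reverse := by
  induction fuel with
  | zero =>
    intro l cur acc h
    have : l = [] := List.length_eq_zero_iff.mp (Nat.le_zero.mp h)
    subst this
    simp [PySem.Chars.splitOn.go, pvSplitSp]
  | succ fuel ih =>
    intro l cur acc h
    cases l with
    | nil => simp [PySem.Chars.splitOn.go, pvSplitSp]
    | cons a rest =>
      have hr : rest.length ≤ fuel := by simpa using Nat.lt_succ_iff.mp (by simpa using h)
      by_cases ha : a = ' '
      · subst ha
        rw [PySem.Chars.splitOn.go]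
        simp only [List.isPrefixOf, BEq.rfl, Bool.true_and, ]
        rw [ih _ _ _ (by simpa using hr)]
        simp [pvSplitSp]
      · rw [PySem.Chars.splitOn.go]
        have hpre : [' '].isPrefixOf (a :: rest) = false := by
          simp [List.isPrefixOf]
          exact fun h' => ha h'.symm
        rw [if_neg (by simp [hpre])]
        rw [ih _ _ _ hr]
        simp [pvSplitSp, ha]

theorem pvSplitOn_eq (l : List Char) : PySem.Chars.splitOn l [' '] = pvSplitSp l [] := by
  unfold PySem.Chars.splitOn
  rw [pvGo_eq (l.length + 1) l [] [] (Nat.le_succ _)]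
  rfl

theorem pvScan_eq_loop (l : List Char) : ∀ cur : List Char,
    pvScanB l cur = pvLoopA ((pvSplitSp l cur).map String.ofList) := by
  induction l with
  | nil =>
    intro cur
    by_cases h : String.ofList cur ∈ pvTentList <;> simp [pvScanB, pvSplitSp, pvLoopA, h]
  | cons a rest ih =>
    intro cur
    by_cases ha : a = ' '
    · subst ha
      by_cases h : String.ofList cur ∈ pvTentList <;>
        simp [pvScanB, pvSplitSp, pvLoopA, h, ih]
    · simp [pvScanB, pvSplitSp, ha, ih]

-- ===== VERDICT (by name: the statement is the Claim_ definition above) =====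
theorem ratioOfTweetsContainingTentative_spec : Claim_equal_ratioOfTweetsContainingTentative := by
  intro text _
  unfold Spec_ratioOfTweetsContainingTentative ratioOfTweetsContainingTentative
      ratioOfTweetsContainingTentative_alt
  simp only [List.map_id_fun']
  have hsplit : (PySem.Str.split? text " ").getD []
      = (PySem.Chars.splitOn text.toList [' ']).map String.ofList := by
    simp [PySem.Str.split?, PySem.Chars.split?]
  rw [hsplit, pvSplitOn_eq]
  simp only [id_eq]
  rw [← pvScan_eq_loop]
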